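-- pv_equiv track=rewrite | github.com/sjhyun7057/Algorithm | 프로그래머스/lv3/92344. 파괴되지 않은 건물/파괴되지 않은 건물.py | solution
-- ===== SOURCE A (Python) =====
-- def solution(board, skill):
--     cnt = 0
--     empty_board = [[0]*(len(board[0])+1) for _ in range(len(board)+1)]
--     for sk in skill:
--         x, r1, c1, r2, c2, degree = sk
--         empty_board[r1][c1] += degree*((-1)**x)
--         empty_board[r1][c2+1] += degree*((-1)**(x+1))
--         empty_board[r2+1][c1] += degree*((-1)**(x+1))
--         empty_board[r2+1][c2+1] += degree*((-1)**x)
--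
--     for i in range(len(board)):
--         for j in range(1,len(board[0])):
--             empty_board[i][j] += empty_board[i][j-1]
--
--     for i in range(1,len(board)):
--         for j in range(len(board[0])):
--             empty_board[i][j] += empty_board[i-1][j]
--
--     for i in range(len(board)):
--         for j in range(len(board[i])):
--             board[i][j] += empty_board[i][j]
--             if board[i][j] > 0:
--                 cnt += 1
--     return cnt
-- ===== SOURCE B (Python) =====
-- def solution(board, skill):
--     for x, r1, c1, r2, c2, degree in skill:
--         val = degree * ((-1) ** x)
--         for i in range(r1, r2 + 1):
--             for j in range(c1, c2 + 1):
--                 board[i][j] += val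
--     return sum(1 for row in board for c in row if c > 0)
-- ===== Notes on version B (the rewrite author's own statement) =====
-- stated objective: simpler
-- what changed: Replaces the 2D difference-array with its two prefix-sum passes by a direct brute-force loop that adds each skill's value to every cell of its rectangle in place, then counts cells > 0 in one final pass.
-- outside the precondition, e.g. on solution([[5], [5]], [[0, -1, 0, -1, 0, 100]]): A returns 0, B returns 2; on solution([[-5, -5, -5]], [[1, 0, 2, 0, 0, 100]]): A returns 1, B returns 0; on solution([[1, 1], [1]], [[0, 0, 0, 1, 1, 1]]): A returns 3, B raises IndexError
import Mathlib
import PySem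

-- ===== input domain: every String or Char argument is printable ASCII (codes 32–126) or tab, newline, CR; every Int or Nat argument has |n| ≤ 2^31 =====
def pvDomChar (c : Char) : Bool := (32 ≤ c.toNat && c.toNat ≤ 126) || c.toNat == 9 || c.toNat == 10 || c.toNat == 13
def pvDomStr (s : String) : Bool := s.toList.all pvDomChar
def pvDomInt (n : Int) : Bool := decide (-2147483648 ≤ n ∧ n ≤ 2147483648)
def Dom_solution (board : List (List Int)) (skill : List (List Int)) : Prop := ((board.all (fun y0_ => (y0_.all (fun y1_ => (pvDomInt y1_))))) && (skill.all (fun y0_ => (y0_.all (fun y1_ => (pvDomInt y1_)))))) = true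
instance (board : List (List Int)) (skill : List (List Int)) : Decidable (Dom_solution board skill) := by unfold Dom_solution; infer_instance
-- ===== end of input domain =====

-- B drops A's 2D difference-array + prefix-sum passes and instead adds each skill's value directly
-- to every cell of its rectangle, then counts cells > 0 (objective: simpler; equivalence is about
-- the RETURN value only — both Pythons mutate `board` in place, B in the same direction).

-- ===== PORT A =====

-- Python (-1)**x: ±1 by the parity of x ((-1.0)**x for x < 0 is the exact float ±1.0, same parity rule)
def pvNeg1Pow (x : Int) : Int := if x % 2 == 0 then 1 else -1

-- Python list index resolution: a negative index wraps by the length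
def pvIdx (len : Nat) (i : Int) : Nat := (if i < 0 then i + (len : Int) else i).toNat

-- 'eb[i][j] += v' at resolved Nat indices (out of range = no-op here; Python raises there, outside Pre_)
def pvAddAt (eb : List (List Int)) (i j : Nat) (v : Int) : List (List Int) :=
  eb.modify i (fun row => row.modify j (fun c => c + v))

-- 'eb[i][j] += v' with Python index semantics (negative wraparound)
def pvAdd2 (eb : List (List Int)) (i j : Int) (v : Int) : List (List Int) :=
  eb.modify (pvIdx eb.length i) (fun row => row.modify (pvIdx row.length j) (fun c => c + v))

-- read eb[i][j] at nonnegative in-range indices (exact there; A only reads such cells inside Pre_)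
def pvGet2 (eb : List (List Int)) (i j : Nat) : Int := (eb.getD i []).getD j 0

-- one skill's four corner updates (the body of A's first loop; a row not of
-- length 6 makes Python's unpacking raise, outside Pre_)
def pvSkillA (eb : List (List Int)) (sk : List Int) : List (List Int) :=
  match sk with
  | [x, r1, c1, r2, c2, degree] =>
    let eb := pvAdd2 eb r1 c1 (degree * pvNeg1Pow x)
    let eb := pvAdd2 eb r1 (c2+1) (degree * pvNeg1Pow (x+1))
    let eb := pvAdd2 eb (r2+1) c1 (degree * pvNeg1Pow (x+1))
    pvAdd2 eb (r2+1) (c2+1) (degree * pvNeg1Pow x)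
  | _ => eb

-- 'eb[i][j] += eb[i][j-1]' (body of the row prefix pass)
def pvRowCell (i : Nat) (eb : List (List Int)) (j : Nat) : List (List Int) :=
  pvAddAt eb i j (pvGet2 eb i (j-1))

-- 'for j in range(1, m): eb[i][j] += eb[i][j-1]'
def pvRowRow (m : Nat) (eb : List (List Int)) (i : Nat) : List (List Int) :=
  (List.range' 1 (m-1)).foldl (pvRowCell i) eb

-- 'eb[i][j] += eb[i-1][j]' (body of the column prefix pass)
def pvColCell (i : Nat) (eb : List (List Int)) (j : Nat) : List (List Int) :=
  pvAddAt eb i j (pvGet2 eb (i-1) j)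

-- 'for j in range(m): eb[i][j] += eb[i-1][j]'
def pvColRow (m : Nat) (eb : List (List Int)) (i : Nat) : List (List Int) :=
  (List.range m).foldl (pvColCell i) eb

def solution (board : List (List Int)) (skill : List (List Int)) : Int :=
  let n := board.length
  let m := (board.headD []).length   -- len(board[0]); Python raises on board = [] (outside Pre_)
  let eb0 : List (List Int) := List.replicate (n+1) (List.replicate (m+1) (0:Int))
  let eb1 := skill.foldl pvSkillA eb0
  let eb2 := (List.range n).foldl (pvRowRow m) eb1
  let eb3 := (List.range' 1 (n-1)).foldl (pvColRow m) eb2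
  -- final pass: Python also writes board[i][j] += eb[i][j]; the value tested is orig + eb, as here
  (List.range n).foldl (fun (cnt : Int) i =>
    (List.range ((board.getD i []).length)).foldl (fun (cnt : Int) j =>
      if (board.getD i []).getD j 0 + pvGet2 eb3 i j > 0 then cnt + 1 else cnt) cnt) 0

-- ===== PORT B =====

-- 'board[i][j] += val' over one row segment: 'for j in range(c1, c2 + 1)'
def pvBRow (val : Int) (i : Int) (c1 c2 : Int) (bd : List (List Int)) : List (List Int) :=
  (PySem.List.pyRange c1 (c2+1) 1).foldl (fun bd j => pvAdd2 bd i j val) bd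

-- one skill applied brute-force to its whole rectangle
def pvBSkill (bd : List (List Int)) (sk : List Int) : List (List Int) :=
  match sk with
  | [x, r1, c1, r2, c2, degree] =>
    let val := degree * pvNeg1Pow x
    (PySem.List.pyRange r1 (r2+1) 1).foldl (fun bd i => pvBRow val i c1 c2 bd) bd
  | _ => bd

def solution_alt (board : List (List Int)) (skill : List (List Int)) : Int :=
  let bd := skill.foldl pvBSkill board
  bd.foldl (fun (cnt : Int) row => row.foldl (fun (cnt : Int) c => if c > 0 then cnt + 1 else cnt) cnt) 0

-- ===== PRECONDITION & SPEC =====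

-- Pre_ excludes empty boards and rows longer than len(board[0])+1 (Python A raises there), and —
-- when skill is nonempty — ragged boards (B's direct write raises on short rows where A may still
-- return) and skills that are not a length-6 in-range rectangle 0 ≤ r1 ≤ r2 < rows, 0 ≤ c1 ≤ c2 < cols:
-- on negative or inverted/out-of-range rectangles A's difference-array corners land by Python index
-- wraparound or cancellation accident — values nobody specifies. With skill = [] any board A accepts
-- is admitted.
def Pre_solution (board : List (List Int)) (skill : List (List Int)) : Prop :=
  board ≠ [] ∧
  ((skill = [] ∧ ∀ row ∈ board, row.length ≤ (board.headD []).length + 1) ∨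
   ((∀ row ∈ board, row.length = (board.headD []).length) ∧
    (∀ sk ∈ skill, sk.length = 6 ∧
      0 ≤ sk.getD 1 0 ∧ sk.getD 1 0 ≤ sk.getD 3 0 ∧ sk.getD 3 0 < (board.length : Int) ∧
      0 ≤ sk.getD 2 0 ∧ sk.getD 2 0 ≤ sk.getD 4 0 ∧ sk.getD 4 0 < ((board.headD []).length : Int))))

instance (board : List (List Int)) (skill : List (List Int)) : Decidable (Pre_solution board skill) := by
  unfold Pre_solution; infer_instance

def pvWitness_solution : List (List Int) × List (List Int) :=
  ([[5, 5, 5], [5, 5, 5]], [[1, 0, 0, 1, 1, 3], [0, 1, 1, 1, 2, 4]])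

def Spec_solution (board : List (List Int)) (skill : List (List Int)) (out : Int) : Prop := out = solution_alt board skill
instance (board : List (List Int)) (skill : List (List Int)) (out : Int) : Decidable (Spec_solution board skill out) := by unfold Spec_solution; infer_instance

-- ===== CLAIM (what is proved, stated in full; the proofs are below) =====
def Claim_equal_solution : Prop := ∀ (board : List (List Int)) (skill : List (List Int)), Dom_solution board skill → Pre_solution board skill → Spec_solution board skill (solution board skill)

-- ===== LEMMAS AND PROOFS =====

-- rectangular shape
def pvRect (eb : List (List Int)) (R C : Nat) : Prop :=
  eb.length = R ∧ ∀ row ∈ eb, row.length = C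

-- a well-formed skill row w.r.t. an n × m board
def pvSkOk (n m : Nat) (sk : List Int) : Prop :=
  sk.length = 6 ∧ 0 ≤ sk.getD 1 0 ∧ sk.getD 1 0 ≤ sk.getD 3 0 ∧ sk.getD 3 0 < (n : Int) ∧
  0 ≤ sk.getD 2 0 ∧ sk.getD 2 0 ≤ sk.getD 4 0 ∧ sk.getD 4 0 < (m : Int)

def pvVal (sk : List Int) : Int := sk.getD 5 0 * pvNeg1Pow (sk.getD 0 0)

-- value a skill adds to cell (i, j)
def pvContrib (sk : List Int) (i j : Nat) : Int :=
  if sk.getD 1 0 ≤ (i:Int) ∧ (i:Int) ≤ sk.getD 3 0 ∧ sk.getD 2 0 ≤ (j:Int) ∧ (j:Int) ≤ sk.getD 4 0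
  then pvVal sk else 0

def pvS (skill : List (List Int)) (i j : Nat) : Int := (skill.map (fun sk => pvContrib sk i j)).sum

-- difference-array corner value a skill leaves at cell (i, j)
def pvCorner (sk : List Int) (i j : Nat) : Int :=
  pvVal sk * ((if (i:Int) = sk.getD 1 0 then 1 else 0) - (if (i:Int) = sk.getD 3 0 + 1 then 1 else 0))
           * ((if (j:Int) = sk.getD 2 0 then 1 else 0) - (if (j:Int) = sk.getD 4 0 + 1 then 1 else 0))

def pvD (skill : List (List Int)) (i j : Nat) : Int := (skill.map (fun sk => pvCorner sk i j)).sum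

-- row / column prefix sums of an abstract grid
def pvRowPS (g : Nat → Nat → Int) (i j : Nat) : Int := ∑ t ∈ Finset.range (j+1), g i t
def pvColPS (g : Nat → Nat → Int) (i j : Nat) : Int := ∑ t ∈ Finset.range (i+1), g t j

theorem pvRect_addAt (eb : List (List Int)) (R C : Nat) (i j : Nat) (v : Int)
    (h : pvRect eb R C) : pvRect (pvAddAt eb i j v) R C := by
  obtain ⟨h1, h2⟩ := h
  refine ⟨by simp [pvAddAt, h1], ?_⟩
  intro row hrow
  rw [List.mem_iff_getElem] at hrow
  obtain ⟨k, hk, hkeq⟩ := hrow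
  simp only [pvAddAt, List.length_modify] at hk
  have hmem : eb[k] ∈ eb := List.getElem_mem hk
  by_cases hik : i = k
  · simp only [pvAddAt] at hkeq
    rw [List.getElem_modify] at hkeq
    rw [if_pos hik] at hkeq
    rw [← hkeq, List.length_modify]; exact h2 _ hmem
  · simp only [pvAddAt] at hkeq
    rw [List.getElem_modify, if_neg hik] at hkeq
    rw [← hkeq]; exact h2 _ hmem

theorem pvGet2_addAt (eb : List (List Int)) (R C : Nat) (i j i' j' : Nat) (v : Int)
    (h : pvRect eb R C) (hi : i < R) (hj : j < C) :
    pvGet2 (pvAddAt eb i j v) i' j' =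
      if i' = i ∧ j' = j then pvGet2 eb i' j' + v else pvGet2 eb i' j' := by
  obtain ⟨h1, h2⟩ := h
  simp only [pvGet2, pvAddAt, List.getD_eq_getElem?_getD, List.getElem?_modify]
  by_cases hii : i = i'
  · subst hii
    have he : eb[i]? = some eb[i] := List.getElem?_eq_getElem (by omega)
    rw [he]
    have hrl : eb[i].length = C := h2 _ (List.getElem_mem _)
    simp only [Option.map_eq_map, Option.map_some, Option.getD_some]
    by_cases hjj : j = j'
    · subst hjj
      have hg : eb[i][j]? = some eb[i][j] := List.getElem?_eq_getElem (by omega)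
      simp [hg]
    · simp [hjj]
      intro h; exact absurd h.symm hjj
  · have hne : ¬(i' = i ∧ j' = j) := by intro hc; exact hii hc.1.symm
    simp [hii, hne]

theorem pvIdx_of_nonneg (len : Nat) (i : Int) (h : 0 ≤ i) : pvIdx len i = i.toNat := by
  unfold pvIdx; rw [if_neg (by omega)]

theorem pvAdd2_eq (eb : List (List Int)) (i j v : Int) (hi : 0 ≤ i) (hj : 0 ≤ j) :
    pvAdd2 eb i j v = pvAddAt eb i.toNat j.toNat v := by
  unfold pvAdd2 pvAddAt
  rw [pvIdx_of_nonneg _ _ hi]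
  congr 1
  funext row
  rw [pvIdx_of_nonneg _ _ hj]

theorem pvNeg1Pow_succ (x : Int) : pvNeg1Pow (x+1) = -pvNeg1Pow x := by
  unfold pvNeg1Pow
  simp only [beq_iff_eq]
  split_ifs with h1 h2 h2 <;> omega

-- one A-side skill step adds the four corner deltas pointwise
theorem pvSkillA_step (n m : Nat) (eb : List (List Int)) (sk : List Int)
    (hR : pvRect eb (n+1) (m+1)) (hsk : pvSkOk n m sk) :
    pvRect (pvSkillA eb sk) (n+1) (m+1) ∧
    ∀ i j : Nat, pvGet2 (pvSkillA eb sk) i j = pvGet2 eb i j + pvCorner sk i j := by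
  have h6 : sk.length = 6 := hsk.1
  obtain ⟨x, r1, c1, r2, c2, d, rfl⟩ : ∃ x r1 c1 r2 c2 d : Int, sk = [x, r1, c1, r2, c2, d] := by
    rcases sk with _ | ⟨x, _ | ⟨r1, _ | ⟨c1, _ | ⟨r2, _ | ⟨c2, _ | ⟨d, _ | ⟨e, rest⟩⟩⟩⟩⟩⟩⟩ <;>
      simp at h6
    exact ⟨x, r1, c1, r2, c2, d, rfl⟩
  obtain ⟨-, hr1, h12, hr2n, hc1, h34, hc2m⟩ := hsk
  simp only [List.getD_cons_succ, List.getD_cons_zero] at hr1 h12 hr2n hc1 h34 hc2m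
  simp only [pvSkillA]
  rw [pvAdd2_eq _ _ _ _ hr1 hc1, pvAdd2_eq _ _ _ _ hr1 (by omega),
      pvAdd2_eq _ _ _ _ (by omega) hc1, pvAdd2_eq _ _ _ _ (by omega) (by omega)]
  have hb1 : r1.toNat < n + 1 := by omega
  have hb2 : (r2+1).toNat < n + 1 := by omega
  have hb3 : c1.toNat < m + 1 := by omega
  have hb4 : (c2+1).toNat < m + 1 := by omega
  have R1 := pvRect_addAt _ _ _ r1.toNat c1.toNat (d * pvNeg1Pow x) hR
  have R2 := pvRect_addAt _ _ _ r1.toNat (c2+1).toNat (d * pvNeg1Pow (x+1)) R1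
  have R3 := pvRect_addAt _ _ _ (r2+1).toNat c1.toNat (d * pvNeg1Pow (x+1)) R2
  have R4 := pvRect_addAt _ _ _ (r2+1).toNat (c2+1).toNat (d * pvNeg1Pow x) R3
  refine ⟨R4, ?_⟩
  intro i j
  rw [pvGet2_addAt _ _ _ _ _ _ _ _ R3 hb2 hb4,
      pvGet2_addAt _ _ _ _ _ _ _ _ R2 hb2 hb3,
      pvGet2_addAt _ _ _ _ _ _ _ _ R1 hb1 hb4,
      pvGet2_addAt _ _ _ _ _ _ _ _ hR hb1 hb3]
  simp only [pvCorner, pvVal, List.getD_cons_succ, List.getD_cons_zero, pvNeg1Pow_succ]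
  simp only [show ((i:Int) = r1) ↔ (i = r1.toNat) from by omega,
      show ((i:Int) = r2 + 1) ↔ (i = (r2+1).toNat) from by omega,
      show ((j:Int) = c1) ↔ (j = c1.toNat) from by omega,
      show ((j:Int) = c2 + 1) ↔ (j = (c2+1).toNat) from by omega]
  split_ifs <;> first | omega | ring

theorem pvDiffPhase (n m : Nat) :
    ∀ (skill : List (List Int)) (eb : List (List Int)),
      pvRect eb (n+1) (m+1) → (∀ sk ∈ skill, pvSkOk n m sk) →
      pvRect (skill.foldl pvSkillA eb) (n+1) (m+1) ∧
      ∀ i j : Nat, pvGet2 (skill.foldl pvSkillA eb) i j = pvGet2 eb i j + pvD skill i j := by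
  intro skill
  induction skill with
  | nil => intro eb hR _; exact ⟨hR, by simp [pvD]⟩
  | cons sk rest ih =>
    intro eb hR hok
    have hstep := pvSkillA_step n m eb sk hR (hok sk (by simp))
    have hrest := ih (pvSkillA eb sk) hstep.1 (fun s hs => hok s (by simp [hs]))
    refine ⟨hrest.1, ?_⟩
    intro i j
    simp only [List.foldl_cons]
    rw [hrest.2 i j, hstep.2 i j]
    simp [pvD]
    ring

theorem pvRowCell_fold (n m i : Nat) (hi : i < n + 1) :
    ∀ (k : Nat) (eb : List (List Int)), k ≤ m → pvRect eb (n+1) (m+1) →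
      pvRect ((List.range' 1 k).foldl (pvRowCell i) eb) (n+1) (m+1) ∧
      ∀ i' j' : Nat, pvGet2 ((List.range' 1 k).foldl (pvRowCell i) eb) i' j' =
        if i' = i ∧ j' ≤ k then pvRowPS (pvGet2 eb) i j' else pvGet2 eb i' j' := by
  intro k
  induction k with
  | zero =>
    intro eb _ hR
    refine ⟨by simpa using hR, ?_⟩
    intro i' j'
    simp only [List.range'_zero, List.foldl_nil]
    by_cases h : i' = i ∧ j' ≤ 0
    · obtain ⟨rfl, h0⟩ := h
      have : j' = 0 := by omega
      subst this
      simp [pvRowPS]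
    · rw [if_neg h]
  | succ k ih =>
    intro eb hk hR
    obtain ⟨ihR, ihg⟩ := ih eb (by omega) hR
    have hconcat : List.range' 1 (k+1) = List.range' 1 k ++ [1 + k] := by
      have := List.range'_concat (step := 1) (s := 1) (n := k)
      simpa using this
    rw [hconcat, List.foldl_append, List.foldl_cons, List.foldl_nil]
    set ebk := (List.range' 1 k).foldl (pvRowCell i) eb with hebk
    have hstepR : pvRect (pvRowCell i ebk (1+k)) (n+1) (m+1) := pvRect_addAt _ _ _ _ _ _ ihR
    refine ⟨hstepR, ?_⟩
    intro i' j'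
    unfold pvRowCell
    rw [pvGet2_addAt _ _ _ _ _ _ _ _ ihR hi (by omega)]
    have hread : pvGet2 ebk i (1 + k - 1) = pvRowPS (pvGet2 eb) i k := by
      rw [ihg i (1+k-1)]
      rw [if_pos (by omega)]
      congr 1
      omega
    by_cases hcur : i' = i ∧ j' = 1 + k
    · obtain ⟨rfl, rfl⟩ := hcur
      rw [if_pos ⟨rfl, rfl⟩, ihg, if_neg (by omega), hread]
      rw [if_pos (by omega)]
      have : 1 + k = k + 1 := by omega
      rw [this]
      simp [pvRowPS, Finset.sum_range_succ]
      ring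
    · rw [if_neg hcur, ihg]
      by_cases h1 : i' = i ∧ j' ≤ k
      · rw [if_pos h1, if_pos ⟨h1.1, by omega⟩]
      · rw [if_neg h1, if_neg (by intro hc; exact h1 ⟨hc.1, by omega⟩)]

theorem pvRowPass (n m : Nat) :
    ∀ (K : Nat) (eb : List (List Int)), K ≤ n → pvRect eb (n+1) (m+1) →
      pvRect ((List.range K).foldl (pvRowRow m) eb) (n+1) (m+1) ∧
      ∀ i' j' : Nat, pvGet2 ((List.range K).foldl (pvRowRow m) eb) i' j' =
        if i' < K ∧ j' ≤ m - 1 then pvRowPS (pvGet2 eb) i' j' else pvGet2 eb i' j' := by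
  intro K
  induction K with
  | zero =>
    intro eb _ hR
    refine ⟨by simpa using hR, ?_⟩
    intro i' j'
    simp
  | succ K ih =>
    intro eb hK hR
    obtain ⟨ihR, ihg⟩ := ih eb (by omega) hR
    rw [List.range_succ, List.foldl_append, List.foldl_cons, List.foldl_nil]
    set ebK := (List.range K).foldl (pvRowRow m) eb with hebK
    obtain ⟨rowR, rowg⟩ := pvRowCell_fold n m K (by omega) (m-1) ebK (by omega) ihR
    refine ⟨rowR, ?_⟩
    intro i' j'
    unfold pvRowRow
    rw [rowg i' j']
    have hrowK : ∀ t : Nat, pvGet2 ebK K t = pvGet2 eb K t := by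
      intro t
      rw [ihg K t, if_neg (by omega)]
    by_cases hcur : i' = K ∧ j' ≤ m - 1
    · obtain ⟨rfl, hj⟩ := hcur
      rw [if_pos ⟨rfl, hj⟩, if_pos ⟨by omega, hj⟩]
      unfold pvRowPS
      exact Finset.sum_congr rfl (fun t _ => hrowK t)
    · rw [if_neg hcur, ihg]
      by_cases h1 : i' < K ∧ j' ≤ m - 1
      · rw [if_pos h1, if_pos ⟨by omega, h1.2⟩]
      · rw [if_neg h1, if_neg (by intro hc; rcases hc with ⟨hc1, hc2⟩; omega)]

theorem pvColCell_fold (n m i : Nat) (hi1 : 1 ≤ i) (hi : i < n + 1) :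
    ∀ (k : Nat) (eb : List (List Int)), k ≤ m → pvRect eb (n+1) (m+1) →
      pvRect ((List.range k).foldl (pvColCell i) eb) (n+1) (m+1) ∧
      ∀ i' j' : Nat, pvGet2 ((List.range k).foldl (pvColCell i) eb) i' j' =
        if i' = i ∧ j' < k then pvGet2 eb i j' + pvGet2 eb (i-1) j' else pvGet2 eb i' j' := by
  intro k
  induction k with
  | zero =>
    intro eb _ hR
    refine ⟨by simpa using hR, ?_⟩
    intro i' j'
    simp
  | succ k ih =>
    intro eb hk hR
    obtain ⟨ihR, ihg⟩ := ih eb (by omega) hR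
    rw [List.range_succ, List.foldl_append, List.foldl_cons, List.foldl_nil]
    set ebk := (List.range k).foldl (pvColCell i) eb with hebk
    have hstepR : pvRect (pvColCell i ebk k) (n+1) (m+1) := pvRect_addAt _ _ _ _ _ _ ihR
    refine ⟨hstepR, ?_⟩
    intro i' j'
    unfold pvColCell
    rw [pvGet2_addAt _ _ _ _ _ _ _ _ ihR hi (by omega)]
    have hread : pvGet2 ebk (i-1) k = pvGet2 eb (i-1) k := by
      rw [ihg (i-1) k, if_neg (by omega)]
    by_cases hcur : i' = i ∧ j' = k
    · obtain ⟨rfl, rfl⟩ := hcur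
      rw [if_pos ⟨rfl, rfl⟩, ihg, if_neg (by omega), hread, if_pos (by omega)]
    · rw [if_neg hcur, ihg]
      by_cases h1 : i' = i ∧ j' < k
      · rw [if_pos h1, if_pos ⟨h1.1, by omega⟩]
      · rw [if_neg h1, if_neg ?_]
        intro hc
        rcases hc with ⟨hc1, hc2⟩
        rcases Nat.lt_succ_iff_lt_or_eq.mp hc2 with h | h
        · exact h1 ⟨hc1, h⟩
        · exact hcur ⟨hc1, h⟩

theorem pvColPass (n m : Nat) :
    ∀ (K : Nat) (eb : List (List Int)), K ≤ n - 1 → pvRect eb (n+1) (m+1) →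
      pvRect ((List.range' 1 K).foldl (pvColRow m) eb) (n+1) (m+1) ∧
      ∀ i' j' : Nat, pvGet2 ((List.range' 1 K).foldl (pvColRow m) eb) i' j' =
        if i' ≤ K ∧ j' < m then pvColPS (pvGet2 eb) i' j' else pvGet2 eb i' j' := by
  intro K
  induction K with
  | zero =>
    intro eb _ hR
    refine ⟨by simpa using hR, ?_⟩
    intro i' j'
    simp only [List.range'_zero, List.foldl_nil]
    by_cases h : i' ≤ 0 ∧ j' < m
    · obtain ⟨h0, hj⟩ := h
      have : i' = 0 := by omega
      subst this
      simp [pvColPS]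
    · rw [if_neg h]
  | succ K ih =>
    intro eb hK hR
    obtain ⟨ihR, ihg⟩ := ih eb (by omega) hR
    have hconcat : List.range' 1 (K+1) = List.range' 1 K ++ [1 + K] := by
      have := List.range'_concat (step := 1) (s := 1) (n := K)
      simpa using this
    rw [hconcat, List.foldl_append, List.foldl_cons, List.foldl_nil]
    set ebK := (List.range' 1 K).foldl (pvColRow m) eb with hebK
    obtain ⟨colR, colg⟩ := pvColCell_fold n m (1+K) (by omega) (by omega) m ebK (by omega) ihR
    refine ⟨colR, ?_⟩
    intro i' j'
    unfold pvColRow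
    rw [colg i' j']
    by_cases hcur : i' = 1 + K ∧ j' < m
    · obtain ⟨rfl, hj⟩ := hcur
      rw [if_pos ⟨rfl, hj⟩, ihg, if_neg (by omega), ihg, if_pos ⟨by omega, hj⟩, if_pos ⟨by omega, hj⟩]
      unfold pvColPS
      have e1 : 1 + K - 1 = K := by omega
      rw [e1, show 1 + K = K + 1 from by omega, Finset.sum_range_succ,
          Finset.sum_range_succ, Finset.sum_range_succ]
      ring
    · rw [if_neg hcur, ihg]
      by_cases h1 : i' ≤ K ∧ j' < m
      · rw [if_pos h1, if_pos ⟨by omega, h1.2⟩]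
      · rw [if_neg h1, if_neg ?_]
        intro hc
        rcases hc with ⟨hc1, hc2⟩
        rcases Nat.lt_succ_iff_lt_or_eq.mp (by omega : i' < K + 2) with h | h
        · exact h1 ⟨by omega, hc2⟩
        · exact hcur ⟨by omega, hc2⟩

-- 0/1 indicator prefix sum
theorem pvIndSum (a : Int) (ha : 0 ≤ a) (i : Nat) :
    (∑ t ∈ Finset.range (i+1), (if (t:Int) = a then (1:Int) else 0)) =
      if a ≤ (i:Int) then 1 else 0 := by
  induction i with
  | zero =>
    rw [Finset.sum_range_one]
    split_ifs <;> push_cast at * <;> omega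
  | succ i ih =>
    rw [Finset.sum_range_succ, ih]
    split_ifs <;> push_cast at * <;> omega

theorem pvCorner_prefix (n m : Nat) (sk : List Int) (hsk : pvSkOk n m sk) (i j : Nat) :
    (∑ t ∈ Finset.range (i+1), ∑ s ∈ Finset.range (j+1), pvCorner sk t s) = pvContrib sk i j := by
  obtain ⟨-, hr1, h12, hr2n, hc1, h34, hc2m⟩ := hsk
  have inner : ∀ t : Nat, (∑ s ∈ Finset.range (j+1), pvCorner sk t s)
      = pvVal sk * ((if (t:Int) = sk.getD 1 0 then 1 else 0) - (if (t:Int) = sk.getD 3 0 + 1 then 1 else 0)) *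
        ((if sk.getD 2 0 ≤ (j:Int) then 1 else 0) - (if sk.getD 4 0 + 1 ≤ (j:Int) then 1 else 0)) := by
    intro t
    unfold pvCorner
    rw [← Finset.mul_sum, Finset.sum_sub_distrib, pvIndSum _ hc1 j, pvIndSum _ (by omega) j]
  calc (∑ t ∈ Finset.range (i+1), ∑ s ∈ Finset.range (j+1), pvCorner sk t s)
      = ∑ t ∈ Finset.range (i+1),
          (pvVal sk * ((if sk.getD 2 0 ≤ (j:Int) then 1 else 0) - (if sk.getD 4 0 + 1 ≤ (j:Int) then 1 else 0)))
          * ((if (t:Int) = sk.getD 1 0 then 1 else 0) - (if (t:Int) = sk.getD 3 0 + 1 then 1 else 0)) := by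
        refine Finset.sum_congr rfl (fun t _ => ?_)
        rw [inner t]; ring
    _ = (pvVal sk * ((if sk.getD 2 0 ≤ (j:Int) then 1 else 0) - (if sk.getD 4 0 + 1 ≤ (j:Int) then 1 else 0)))
          * ((if sk.getD 1 0 ≤ (i:Int) then 1 else 0) - (if sk.getD 3 0 + 1 ≤ (i:Int) then 1 else 0)) := by
        rw [← Finset.mul_sum, Finset.sum_sub_distrib, pvIndSum _ hr1 i, pvIndSum _ (by omega) i]
    _ = pvContrib sk i j := by
        unfold pvContrib
        split_ifs <;> omega

theorem pvD_prefix (n m : Nat) (skill : List (List Int)) (h : ∀ sk ∈ skill, pvSkOk n m sk) (i j : Nat) :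
    (∑ t ∈ Finset.range (i+1), ∑ s ∈ Finset.range (j+1), pvD skill t s) = pvS skill i j := by
  induction skill with
  | nil => simp [pvD, pvS]
  | cons sk rest ih =>
    have hsplit : ∀ t s : Nat, pvD (sk :: rest) t s = pvCorner sk t s + pvD rest t s := by
      intro t s; simp [pvD]
    calc (∑ t ∈ Finset.range (i+1), ∑ s ∈ Finset.range (j+1), pvD (sk :: rest) t s)
        = (∑ t ∈ Finset.range (i+1), ∑ s ∈ Finset.range (j+1), pvCorner sk t s)
          + (∑ t ∈ Finset.range (i+1), ∑ s ∈ Finset.range (j+1), pvD rest t s) := by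
          rw [← Finset.sum_add_distrib]
          refine Finset.sum_congr rfl (fun t _ => ?_)
          rw [← Finset.sum_add_distrib]
          exact Finset.sum_congr rfl (fun s _ => hsplit t s)
      _ = pvContrib sk i j + pvS rest i j := by
          rw [pvCorner_prefix n m sk (h sk (by simp)) i j, ih (fun s hs => h s (by simp [hs]))]
      _ = pvS (sk :: rest) i j := by simp [pvS]

-- B side: one row segment
theorem pvBRow_fold (n m : Nat) (val i : Int) (hi0 : 0 ≤ i) (hin : i < (n:Int)) :
    ∀ (len : Nat) (a b : Int), (b + 1 - a).toNat = len → 0 ≤ a → b < (m:Int) →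
      ∀ (bd : List (List Int)), pvRect bd n m →
      pvRect (pvBRow val i a b bd) n m ∧
      ∀ i' j' : Nat, pvGet2 (pvBRow val i a b bd) i' j' =
        pvGet2 bd i' j' + if i' = i.toNat ∧ a ≤ (j':Int) ∧ (j':Int) ≤ b then val else 0 := by
  intro len
  induction len with
  | zero =>
    intro a b hlen ha hb bd hR
    unfold pvBRow
    rw [PySem.List.pyRange_one_eq_nil (by omega), List.foldl_nil]
    refine ⟨hR, ?_⟩
    intro i' j'
    rw [if_neg (by rintro ⟨-, h1, h2⟩; omega), add_zero]
  | succ len ih =>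
    intro a b hlen ha hb bd hR
    unfold pvBRow
    rw [PySem.List.pyRange_one_cons (by omega), List.foldl_cons]
    rw [pvAdd2_eq _ _ _ _ hi0 ha]
    have hR1 : pvRect (pvAddAt bd i.toNat a.toNat val) n m := pvRect_addAt _ _ _ _ _ _ hR
    obtain ⟨ihR, ihg⟩ := ih (a+1) b (by omega) (by omega) hb _ hR1
    unfold pvBRow at ihR ihg
    refine ⟨ihR, ?_⟩
    intro i' j'
    rw [ihg i' j', pvGet2_addAt _ _ _ _ _ _ _ _ hR (by omega) (by omega)]
    simp only [show (j' = a.toNat) ↔ ((j':Int) = a) from by omega]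
    split_ifs <;> omega

theorem pvBRows_fold (n m : Nat) (val c1 c2 : Int) (hc1 : 0 ≤ c1) (hc2 : c2 < (m:Int)) :
    ∀ (len : Nat) (a b : Int), (b + 1 - a).toNat = len → 0 ≤ a → b < (n:Int) →
      ∀ (bd : List (List Int)), pvRect bd n m →
      pvRect ((PySem.List.pyRange a (b+1) 1).foldl (fun bd i => pvBRow val i c1 c2 bd) bd) n m ∧
      ∀ i' j' : Nat, pvGet2 ((PySem.List.pyRange a (b+1) 1).foldl (fun bd i => pvBRow val i c1 c2 bd) bd) i' j' =
        pvGet2 bd i' j' +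
          if (a ≤ (i':Int) ∧ (i':Int) ≤ b) ∧ c1 ≤ (j':Int) ∧ (j':Int) ≤ c2 then val else 0 := by
  intro len
  induction len with
  | zero =>
    intro a b hlen ha hb bd hR
    rw [PySem.List.pyRange_one_eq_nil (by omega), List.foldl_nil]
    refine ⟨hR, ?_⟩
    intro i' j'
    rw [if_neg (by rintro ⟨⟨h1, h2⟩, -⟩; omega), add_zero]
  | succ len ih =>
    intro a b hlen ha hb bd hR
    rw [PySem.List.pyRange_one_cons (by omega), List.foldl_cons]
    obtain ⟨hc2' , -⟩ := And.intro hc2 trivial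
    have hrow := pvBRow_fold n m val a ha (by omega) (c2+1-c1).toNat c1 c2 rfl hc1 hc2 bd hR
    obtain ⟨rowR, rowg⟩ := hrow
    obtain ⟨ihR, ihg⟩ := ih (a+1) b (by omega) (by omega) hb _ rowR
    refine ⟨ihR, ?_⟩
    intro i' j'
    rw [ihg i' j', rowg i' j']
    simp only [show (i' = a.toNat) ↔ ((i':Int) = a) from by omega]
    split_ifs <;> omega

theorem pvBSkill_step (n m : Nat) (bd : List (List Int)) (sk : List Int)
    (hR : pvRect bd n m) (hsk : pvSkOk n m sk) :
    pvRect (pvBSkill bd sk) n m ∧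
    ∀ i j : Nat, pvGet2 (pvBSkill bd sk) i j = pvGet2 bd i j + pvContrib sk i j := by
  have h6 : sk.length = 6 := hsk.1
  obtain ⟨x, r1, c1, r2, c2, d, rfl⟩ : ∃ x r1 c1 r2 c2 d : Int, sk = [x, r1, c1, r2, c2, d] := by
    rcases sk with _ | ⟨x, _ | ⟨r1, _ | ⟨c1, _ | ⟨r2, _ | ⟨c2, _ | ⟨d, _ | ⟨e, rest⟩⟩⟩⟩⟩⟩⟩ <;>
      simp at h6
    exact ⟨x, r1, c1, r2, c2, d, rfl⟩
  obtain ⟨-, hr1, h12, hr2n, hc1, h34, hc2m⟩ := hsk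
  simp only [List.getD_cons_succ, List.getD_cons_zero] at hr1 h12 hr2n hc1 h34 hc2m
  simp only [pvBSkill]
  obtain ⟨R, g⟩ := pvBRows_fold n m (d * pvNeg1Pow x) c1 c2 hc1 hc2m
    (r2+1-r1).toNat r1 r2 rfl hr1 hr2n bd hR
  refine ⟨R, ?_⟩
  intro i j
  rw [g i j]
  simp only [pvContrib, pvVal, List.getD_cons_succ, List.getD_cons_zero]
  split_ifs <;> omega

theorem pvBPhase (n m : Nat) :
    ∀ (skill : List (List Int)) (bd : List (List Int)),
      pvRect bd n m → (∀ sk ∈ skill, pvSkOk n m sk) →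
      pvRect (skill.foldl pvBSkill bd) n m ∧
      ∀ i j : Nat, pvGet2 (skill.foldl pvBSkill bd) i j = pvGet2 bd i j + pvS skill i j := by
  intro skill
  induction skill with
  | nil => intro bd hR _; exact ⟨hR, by simp [pvS]⟩
  | cons sk rest ih =>
    intro bd hR hok
    have hstep := pvBSkill_step n m bd sk hR (hok sk (by simp))
    have hrest := ih (pvBSkill bd sk) hstep.1 (fun s hs => hok s (by simp [hs]))
    refine ⟨hrest.1, ?_⟩
    intro i j
    simp only [List.foldl_cons]
    rw [hrest.2 i j, hstep.2 i j]
    simp [pvS]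
    ring

-- a list foldl as an index foldl
theorem pvFoldIdx {α : Type} (f : α → Int → α) :
    ∀ (row : List Int) (c : α),
      row.foldl f c = (List.range row.length).foldl (fun c j => f c (row.getD j 0)) c := by
  intro row
  induction row with
  | nil => intro c; simp
  | cons a row ih =>
    intro c
    rw [List.foldl_cons, ih (f c a), List.length_cons, List.range_succ_eq_map,
        List.foldl_cons, List.foldl_map]
    rfl

theorem pvFoldIdx2 {α : Type} (f : α → List Int → α) :
    ∀ (bd : List (List Int)) (c : α),
      bd.foldl f c = (List.range bd.length).foldl (fun c i => f c (bd.getD i [])) c := by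
  intro bd
  induction bd with
  | nil => intro c; simp
  | cons a bd ih =>
    intro c
    rw [List.foldl_cons, ih (f c a), List.length_cons, List.range_succ_eq_map,
        List.foldl_cons, List.foldl_map]
    rfl

theorem pvFoldlCongr {α β : Type} :
    ∀ (l : List β) (f g : α → β → α) (c : α), (∀ c' x, x ∈ l → f c' x = g c' x) →
      l.foldl f c = l.foldl g c := by
  intro l
  induction l with
  | nil => intro f g c _; rfl
  | cons a l ih =>
    intro f g c h
    rw [List.foldl_cons, List.foldl_cons, h c a (by simp)]
    exact ih f g _ (fun c' x hx => h c' x (by simp [hx]))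

-- the zero grid is a fixed point of every in-place pass
theorem pvAddAt_zero (eb : List (List Int)) (i j : Nat) : pvAddAt eb i j 0 = eb := by
  unfold pvAddAt
  have hf : (fun c : Int => c + 0) = id := funext (by simp)
  rw [hf]
  have hrow : (fun row : List Int => row.modify j id) = id := funext (by simp [List.modify_id])
  rw [hrow, List.modify_id]

theorem pvFoldFixed {β : Type} (f : List (List Int) → β → List (List Int)) (eb : List (List Int))
    (h : ∀ b : β, f eb b = eb) : ∀ l : List β, l.foldl f eb = eb := by
  intro l
  induction l with
  | nil => rfl
  | cons a l ih => rw [List.foldl_cons, h a, ih]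

-- with no skills, A's grid stays identically zero and B leaves the board untouched
theorem pvMainNil (board : List (List Int)) :
    solution board [] = solution_alt board [] := by
  set n := board.length with hn
  set m := (board.headD []).length with hm
  set eb0 : List (List Int) := List.replicate (n+1) (List.replicate (m+1) (0:Int)) with heb0
  have hz : ∀ i j : Nat, pvGet2 eb0 i j = 0 := by
    intro i j
    simp only [heb0, pvGet2, List.getD_eq_getElem?_getD, List.getElem?_replicate]
    split_ifs with h
    · simp [List.getElem?_replicate]
      split_ifs <;> simp
    · simp
  have hrowfix : ∀ i : Nat, pvRowRow m eb0 i = eb0 := by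
    intro i
    unfold pvRowRow
    exact pvFoldFixed _ _ (fun j => by unfold pvRowCell; rw [hz i (j-1), pvAddAt_zero]) _
  have hcolfix : ∀ i : Nat, pvColRow m eb0 i = eb0 := by
    intro i
    unfold pvColRow
    exact pvFoldFixed _ _ (fun j => by unfold pvColCell; rw [hz (i-1) j, pvAddAt_zero]) _
  show (List.range n).foldl (fun (cnt : Int) i =>
      (List.range ((board.getD i []).length)).foldl (fun (cnt : Int) j =>
        if (board.getD i []).getD j 0 +
          pvGet2 ((List.range' 1 (n-1)).foldl (pvColRow m) ((List.range n).foldl (pvRowRow m)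
            (List.foldl pvSkillA eb0 []) )) i j > 0 then cnt + 1 else cnt) cnt) 0 =
    (List.foldl pvBSkill board []).foldl
      (fun (cnt : Int) row => row.foldl (fun (cnt : Int) c => if c > 0 then cnt + 1 else cnt) cnt) 0
  rw [List.foldl_nil, List.foldl_nil,
      pvFoldFixed _ _ hrowfix (List.range n), pvFoldFixed _ _ hcolfix (List.range' 1 (n-1))]
  rw [pvFoldIdx2 _ board 0]
  refine pvFoldlCongr (List.range n) _ _ 0 ?_
  intro c i _
  rw [pvFoldIdx _ (board.getD i []) c]
  refine pvFoldlCongr (List.range ((board.getD i []).length)) _ _ c ?_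
  intro c' j _
  rw [hz i j, add_zero]

theorem pvMain (board : List (List Int)) (skill : List (List Int))
    (hpre : Pre_solution board skill) : solution board skill = solution_alt board skill := by
  obtain ⟨hne, hcases⟩ := hpre
  rcases hcases with ⟨rfl, -⟩ | ⟨hrect, hskpre⟩
  · exact pvMainNil board
  set n := board.length with hn
  set m := (board.headD []).length with hm
  have hn1 : 1 ≤ n := by
    cases board with
    | nil => exact absurd rfl hne
    | cons a l => simp [hn]
  have hok : ∀ sk ∈ skill, pvSkOk n m sk := hskpre
  have hRb : pvRect board n m := ⟨rfl, hrect⟩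
  -- A side grid
  have hR0 : pvRect (List.replicate (n+1) (List.replicate (m+1) (0:Int))) (n+1) (m+1) := by
    constructor
    · simp
    · intro row hrow
      rw [List.eq_of_mem_replicate hrow]
      simp
  have hz : ∀ i j : Nat, pvGet2 (List.replicate (n+1) (List.replicate (m+1) (0:Int))) i j = 0 := by
    intro i j
    simp only [pvGet2, List.getD_eq_getElem?_getD, List.getElem?_replicate]
    split_ifs with h
    · simp [List.getElem?_replicate]
      split_ifs <;> simp
    · simp
  obtain ⟨hR1, hg1⟩ := pvDiffPhase n m skill _ hR0 hok
  obtain ⟨hR2, hg2⟩ := pvRowPass n m n _ (le_refl n) hR1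
  obtain ⟨hR3, hg3⟩ := pvColPass n m (n-1) _ (le_refl (n-1)) hR2
  set eb1 := skill.foldl pvSkillA (List.replicate (n+1) (List.replicate (m+1) (0:Int))) with heb1
  set eb2 := (List.range n).foldl (pvRowRow m) eb1 with heb2
  set eb3 := (List.range' 1 (n-1)).foldl (pvColRow m) eb2 with heb3
  have key : ∀ i j : Nat, i < n → j < m → pvGet2 eb3 i j = pvS skill i j := by
    intro i j hi hj
    rw [hg3 i j, if_pos ⟨by omega, hj⟩]
    unfold pvColPS
    have step1 : ∀ t ∈ Finset.range (i+1), pvGet2 eb2 t j = pvRowPS (pvGet2 eb1) t j := by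
      intro t ht
      rw [hg2 t j, if_pos ⟨by simp at ht; omega, by omega⟩]
    rw [Finset.sum_congr rfl step1]
    unfold pvRowPS
    have step2 : ∀ t ∈ Finset.range (i+1), (∑ s ∈ Finset.range (j+1), pvGet2 eb1 t s)
        = ∑ s ∈ Finset.range (j+1), pvD skill t s := by
      intro t _
      refine Finset.sum_congr rfl (fun s _ => ?_)
      rw [hg1 t s, hz t s, zero_add]
    rw [Finset.sum_congr rfl step2, pvD_prefix n m skill hok i j]
  -- B side grid
  obtain ⟨hRB, hgB⟩ := pvBPhase n m skill board hRb hok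
  set bd := skill.foldl pvBSkill board with hbd
  have hrowlen : ∀ i : Nat, i < n → (board.getD i []).length = m := by
    intro i hi
    have : board.getD i [] = board[i]'(by omega) := by
      rw [List.getD_eq_getElem?_getD, List.getElem?_eq_getElem (by omega)]
      rfl
    rw [this]
    exact hrect _ (List.getElem_mem _)
  have hbdlen : ∀ i : Nat, i < n → (bd.getD i []).length = m := by
    intro i hi
    have hl : bd.length = n := hRB.1
    have : bd.getD i [] = bd[i]'(by omega) := by
      rw [List.getD_eq_getElem?_getD, List.getElem?_eq_getElem (by omega)]
      rfl
    rw [this]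
    exact hRB.2 _ (List.getElem_mem _)
  -- unfold both programs to counting folds
  show (List.range n).foldl (fun (cnt : Int) i =>
      (List.range ((board.getD i []).length)).foldl (fun (cnt : Int) j =>
        if (board.getD i []).getD j 0 + pvGet2 eb3 i j > 0 then cnt + 1 else cnt) cnt) 0 =
    bd.foldl (fun (cnt : Int) row => row.foldl (fun (cnt : Int) c => if c > 0 then cnt + 1 else cnt) cnt) 0
  rw [pvFoldIdx2 _ bd 0, hRB.1]
  refine pvFoldlCongr (List.range n) _ _ 0 ?_
  intro c i hi
  have hin : i < n := by simpa using hi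
  rw [hrowlen i hin, pvFoldIdx _ (bd.getD i []) c, hbdlen i hin]
  refine pvFoldlCongr (List.range m) _ _ c ?_
  intro c' j hj
  have hjm : j < m := by simpa using hj
  have hcell : (board.getD i []).getD j 0 + pvGet2 eb3 i j = (bd.getD i []).getD j 0 := by
    have h1 : pvGet2 bd i j = pvGet2 board i j + pvS skill i j := hgB i j
    have h2 : pvGet2 eb3 i j = pvS skill i j := key i j hin hjm
    simp only [pvGet2] at h1
    rw [h2, h1]
  rw [hcell]

-- ===== VERDICT (by name: the statement is the Claim_ definition above) =====
theorem solution_spec : Claim_equal_solution := by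
  intro board skill _ hpre
  unfold Spec_solution
  exact pvMain board skill hpre
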